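-- pv_equiv track=rewrite | github.com/JayeshMD/MAPSR | post_process_mapsr.py | get_var_list
-- ===== SOURCE A (Python) =====
-- def get_var_list(delay, var_names):
--     var_list = dict()
--     start_ids = []
--     count = 0
--     for i in range(len(var_names)):
--         start_ids.append(count)
--         for j in range(len(delay[i])):
--             var_list[count]= var_names[i]
--             count +=1
--     return var_list, start_ids
-- ===== SOURCE B (Python) =====
-- def get_var_list(delay, var_names):
--     lengths = [len(delay[i]) for i in range(len(var_names))]
--     start_ids = [sum(lengths[:i]) for i in range(len(lengths))]
--     flat = [name for name, l in zip(var_names, lengths) for _ in range(l)]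
--     var_list = dict(enumerate(flat))
--     return var_list, start_ids
-- ===== Notes on version B (the rewrite author's own statement) =====
-- stated objective: alternative
-- what changed: Replaces the single count-threaded interleaved loop with a prefix-sum pass over group lengths for start_ids plus a dict built by enumerate over the flattened repeated-name sequence.
import Mathlib
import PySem

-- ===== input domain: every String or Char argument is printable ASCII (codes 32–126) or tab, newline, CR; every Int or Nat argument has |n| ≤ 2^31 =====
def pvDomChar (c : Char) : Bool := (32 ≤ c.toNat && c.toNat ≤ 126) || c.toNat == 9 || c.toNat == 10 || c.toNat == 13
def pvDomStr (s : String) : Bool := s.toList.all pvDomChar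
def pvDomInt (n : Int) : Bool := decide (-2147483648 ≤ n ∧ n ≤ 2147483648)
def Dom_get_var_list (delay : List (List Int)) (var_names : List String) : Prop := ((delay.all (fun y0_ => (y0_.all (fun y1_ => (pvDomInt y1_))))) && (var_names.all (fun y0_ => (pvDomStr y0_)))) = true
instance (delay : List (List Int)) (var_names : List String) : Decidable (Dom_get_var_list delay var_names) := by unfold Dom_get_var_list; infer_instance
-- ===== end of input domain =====

-- B replaces A's count-threaded interleaved loop by a prefix-sum pass plus an enumerate-built dict; same cost class, no speed claim.

-- ===== PORT A =====
-- delay[i] / var_names[i] are totalized with pyGetD; Pre_ excludes the IndexError case (len(delay) < len(var_names)).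
def get_var_list (delay : List (List Int)) (var_names : List String) : (List (Int × String)) × List Int :=
  let r := (PySem.List.pyRange 0 (var_names.length : Int) 1).foldl
    (fun (s : PySem.Dict Int String × List Int × Int) i =>
      let start_ids := s.2.1 ++ [s.2.2]
      let inner := (PySem.List.pyRange 0 ((PySem.List.pyGetD delay i []).length : Int) 1).foldl
        (fun (t : PySem.Dict Int String × Int) _j =>
          (t.1.insert t.2 (PySem.List.pyGetD var_names i ""), t.2 + 1))
        (s.1, s.2.2)
      (inner.1, start_ids, inner.2))
    (PySem.Dict.empty, ([], 0))
  (r.1.items, r.2.1)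

-- ===== PORT B =====
def get_var_list_alt (delay : List (List Int)) (var_names : List String) : (List (Int × String)) × List Int :=
  let lengths : List Int := (PySem.List.pyRange 0 (var_names.length : Int) 1).map
    (fun i => ((PySem.List.pyGetD delay i []).length : Int))
  let start_ids := (PySem.List.pyRange 0 (lengths.length : Int) 1).map
    (fun i => (PySem.List.slice lengths none (some i)).sum)
  let flat := (var_names.zip lengths).flatMap
    (fun p => (PySem.List.pyRange 0 p.2 1).map (fun _ => p.1))
  let var_list := (PySem.List.enumerate flat).foldl
    (fun (d : PySem.Dict Int String) p => d.insert p.1 p.2) PySem.Dict.empty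
  (var_list.items, start_ids)

-- ===== PRECONDITION & SPEC =====
-- Pre_ excludes exactly the inputs where Python A (and B) raise IndexError: fewer delay groups than variable names.
def Pre_get_var_list (delay : List (List Int)) (var_names : List String) : Prop :=
  var_names.length ≤ delay.length
instance (delay : List (List Int)) (var_names : List String) : Decidable (Pre_get_var_list delay var_names) := by unfold Pre_get_var_list; infer_instance
def pvWitness_get_var_list : List (List Int) × List String := ([[1, 2], [3]], ["x", "y"])

def Spec_get_var_list (delay : List (List Int)) (var_names : List String) (out : (List (Int × String)) × List Int) : Prop := out = get_var_list_alt delay var_names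
instance (delay : List (List Int)) (var_names : List String) (out : (List (Int × String)) × List Int) : Decidable (Spec_get_var_list delay var_names out) := by unfold Spec_get_var_list; infer_instance

-- ===== CLAIM (what is proved, stated in full; the proofs are below) =====
def Claim_equal_get_var_list : Prop := ∀ (delay : List (List Int)) (var_names : List String), Dom_get_var_list delay var_names → Pre_get_var_list delay var_names → Spec_get_var_list delay var_names (get_var_list delay var_names)

-- ===== LEMMAS AND PROOFS =====

def pvLen (delay : List (List Int)) (i : Nat) : Nat := (PySem.List.pyGetD delay (i : Int) []).length
def pvName (var_names : List String) (i : Nat) : String := PySem.List.pyGetD var_names (i : Int) ""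
def pvTot (delay : List (List Int)) : Nat → Nat
  | 0 => 0
  | n + 1 => pvTot delay n + pvLen delay n
def pvBig (delay : List (List Int)) (var_names : List String) (n : Nat) : List (Int × String) :=
  (List.range n).flatMap (fun i => (List.range (pvLen delay i)).map
    (fun (j : Nat) => (((pvTot delay i : Nat) : Int) + (j : Int), pvName var_names i)))
def pvSids (delay : List (List Int)) (n : Nat) : List Int :=
  (List.range n).map (fun i => ((pvTot delay i : Nat) : Int))

theorem pvTot_mono (delay : List (List Int)) {i n : Nat} (h : i ≤ n) : pvTot delay i ≤ pvTot delay n := by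
  induction n with
  | zero =>
    have hi : i = 0 := by omega
    subst hi; exact le_rfl
  | succ n ih =>
    rcases Nat.eq_or_lt_of_le h with rfl | h'
    · exact le_rfl
    · have h2 := ih (by omega)
      simp only [pvTot]
      omega

theorem pvBig_keys_lt (delay : List (List Int)) (var_names : List String) (n : Nat)
    {k : Int} (hk : k ∈ (pvBig delay var_names n).map Prod.fst) : k < ((pvTot delay n : Nat) : Int) := by
  simp [pvBig] at hk
  obtain ⟨i, hi, j, hj, rfl⟩ := hk
  have h1 : pvTot delay i + pvLen delay i ≤ pvTot delay n := by
    have h2 : pvTot delay (i + 1) ≤ pvTot delay n := pvTot_mono delay (by omega)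
    simp only [pvTot] at h2
    exact h2
  omega

theorem inner_fold (name : String) (l : List Int) (d : PySem.Dict Int String) (c : Int)
    (h : ∀ k ∈ d.keys, k < c) :
    l.foldl (fun (t : PySem.Dict Int String × Int) _j => (t.1.insert t.2 name, t.2 + 1)) (d, c)
      = (PySem.Dict.mk (d.items ++ (List.range l.length).map (fun (j : Nat) => (c + (j : Int), name))), c + l.length) := by
  induction l generalizing d c with
  | nil =>
    refine Prod.ext (PySem.Dict.ext ?_) (by simp)
    simp
  | cons x l ih =>
    have hnc : d.contains c = false := by
      cases hcv : d.contains c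
      · rfl
      · have hm : c ∈ d.keys := (PySem.Dict.contains_iff_mem_keys d c).1 hcv
        exact absurd (h c hm) (by omega)
    have hkeys : ∀ k ∈ (d.insert c name).keys, k < c + 1 := by
      intro k hk
      rcases (PySem.Dict.mem_keys_insert d c k name).1 hk with rfl | hk'
      · omega
      · have := h k hk'; omega
    rw [List.foldl_cons, ih (d.insert c name) (c + 1) hkeys]
    simp only [Prod.mk.injEq]
    refine ⟨?_, by simp only [List.length_cons]; push_cast; omega⟩
    apply PySem.Dict.ext
    show (d.insert c name).items ++
        (List.range l.length).map (fun (j : Nat) => (c + 1 + (j : Int), name))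
      = d.items ++ (List.range (x :: l).length).map (fun (j : Nat) => (c + (j : Int), name))
    rw [PySem.Dict.items_insert_of_not_contains d name hnc, List.append_assoc,
      List.length_cons, List.range_succ_eq_map, List.map_cons, List.map_map,
      List.singleton_append]
    refine congrArg (fun t => d.items ++ t) ?_
    refine congrArg₂ (· :: ·) (by simp) ?_
    apply List.map_congr_left
    intro a _
    simp only [Function.comp_apply]
    refine congrArg (fun z => (z, name)) ?_
    push_cast
    omega

theorem A_fold (delay : List (List Int)) (var_names : List String) (n : Nat) :
    (PySem.List.pyRange 0 (n : Int) 1).foldl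
      (fun (s : PySem.Dict Int String × List Int × Int) i =>
        let start_ids := s.2.1 ++ [s.2.2]
        let inner := (PySem.List.pyRange 0 ((PySem.List.pyGetD delay i []).length : Int) 1).foldl
          (fun (t : PySem.Dict Int String × Int) _j =>
            (t.1.insert t.2 (PySem.List.pyGetD var_names i ""), t.2 + 1))
          (s.1, s.2.2)
        (inner.1, start_ids, inner.2))
      (PySem.Dict.empty, ([], 0))
    = (PySem.Dict.mk (pvBig delay var_names n), pvSids delay n, ((pvTot delay n : Nat) : Int)) := by
  induction n with
  | zero =>
    rw [PySem.List.pyRange_one_eq_nil (by omega)]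
    simp only [List.foldl_nil, pvBig, pvSids, pvTot, List.range_zero, List.flatMap_nil,
      List.map_nil, Nat.cast_zero]
    exact congrArg (fun d' => (d', ([] : List Int), (0 : Int))) (PySem.Dict.ext rfl)
  | succ n ih =>
    have hsplit : PySem.List.pyRange 0 ((n + 1 : Nat) : Int) 1
        = PySem.List.pyRange 0 (n : Int) 1 ++ [(n : Int)] := by
      push_cast
      rw [PySem.List.pyRange_one_succ_right (by omega)]
    rw [hsplit, List.foldl_append, ih, List.foldl_cons, List.foldl_nil]
    simp only
    have hkeys : ∀ k ∈ (PySem.Dict.mk (pvBig delay var_names n)).keys, k < ((pvTot delay n : Nat) : Int) := by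
      intro k hk
      exact pvBig_keys_lt delay var_names n (by simpa [PySem.Dict.keys] using hk)
    rw [inner_fold (PySem.List.pyGetD var_names (n : Int) "") _ _ _ hkeys]
    simp only [Prod.mk.injEq]
    refine ⟨?_, ?_, ?_⟩
    · apply PySem.Dict.ext
      show pvBig delay var_names n ++ _ = pvBig delay var_names (n + 1)
      conv_rhs => rw [pvBig, List.range_succ, List.flatMap_append]
      rw [← pvBig]
      simp [pvLen, pvName]
    · show pvSids delay n ++ _ = pvSids delay (n + 1)
      conv_rhs => rw [pvSids, List.range_succ, List.map_append]
      rw [← pvSids]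
      simp
    · simp only [PySem.List.length_pyRange_one]
      have : ((((PySem.List.pyGetD delay ((n : Nat) : Int) []).length : Int) - 0)).toNat
          = pvLen delay n := by simp [pvLen]
      rw [this, pvTot]
      push_cast; omega

theorem portA_eq (delay : List (List Int)) (var_names : List String) :
    get_var_list delay var_names
      = (pvBig delay var_names var_names.length, pvSids delay var_names.length) := by
  unfold get_var_list
  rw [A_fold]

theorem enumerate_append {α : Type} (xs ys : List α) (s : Int) :
    PySem.List.enumerate (xs ++ ys) s
      = PySem.List.enumerate xs s ++ PySem.List.enumerate ys (s + xs.length) := by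
  induction xs generalizing s with
  | nil => simp [PySem.List.enumerate_nil]
  | cons x xs ih =>
    rw [List.cons_append, PySem.List.enumerate_cons, ih, PySem.List.enumerate_cons,
      List.cons_append]
    refine congrArg₂ (· :: ·) rfl
      (congrArg (fun z => PySem.List.enumerate xs (s + 1) ++ PySem.List.enumerate ys z) ?_)
    simp only [List.length_cons]
    push_cast
    omega

theorem enumerate_const {α : Type} (a : α) (m : Nat) (s : Int) :
    PySem.List.enumerate ((List.range m).map (fun _ => a)) s
      = (List.range m).map (fun (j : Nat) => (s + (j : Int), a)) := by
  induction m generalizing s with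
  | zero => simp [PySem.List.enumerate_nil]
  | succ m ih =>
    rw [List.range_succ, List.map_append, enumerate_append, ih, List.map_append]
    congr 1
    simp [PySem.List.enumerate_cons, PySem.List.enumerate_nil]

theorem enumerate_map_fst {α : Type} (xs : List α) (s : Int) :
    (PySem.List.enumerate xs s).map Prod.fst = (List.range xs.length).map (fun (j : Nat) => s + (j : Int)) := by
  induction xs generalizing s with
  | nil => simp [PySem.List.enumerate_nil]
  | cons x xs ih =>
    rw [PySem.List.enumerate_cons, List.map_cons, ih, List.length_cons,
      List.range_succ_eq_map, List.map_cons, List.map_map]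
    congr 1
    · simp
    · apply List.map_congr_left
      intro j _
      simp only [Function.comp]
      push_cast; omega

theorem pvFlat_len (delay : List (List Int)) (var_names : List String) (n : Nat) :
    ((List.range n).flatMap (fun i => (List.range (pvLen delay i)).map (fun _ => pvName var_names i))).length
      = pvTot delay n := by
  induction n with
  | zero => simp [pvTot]
  | succ n ih =>
    rw [List.range_succ, List.flatMap_append, List.length_append, ih]
    simp only [List.flatMap_cons, List.flatMap_nil, List.append_nil, List.length_map,
      List.length_range]
    rw [pvTot]

theorem enumerate_flat (delay : List (List Int)) (var_names : List String) (n : Nat) :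
    PySem.List.enumerate ((List.range n).flatMap (fun i => (List.range (pvLen delay i)).map (fun _ => pvName var_names i))) 0
      = pvBig delay var_names n := by
  induction n with
  | zero => simp [pvBig, PySem.List.enumerate_nil]
  | succ n ih =>
    rw [List.range_succ, List.flatMap_append, enumerate_append, ih, pvFlat_len]
    simp only [List.flatMap_cons, List.flatMap_nil, List.append_nil]
    rw [enumerate_const]
    conv_rhs => rw [pvBig, List.range_succ, List.flatMap_append]
    rw [← pvBig]
    simp

theorem sum_take_len (delay : List (List Int)) (k : Nat) :
    (((List.range k).map (fun i => (pvLen delay i : Int)))).sum = ((pvTot delay k : Nat) : Int) := by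
  induction k with
  | zero => simp [pvTot]
  | succ k ih =>
    rw [List.range_succ, List.map_append, List.sum_append, ih, pvTot]
    simp

theorem pyRange_nat_map {α : Type} (n : Nat) (f : Int → α) :
    (PySem.List.pyRange 0 (n : Int) 1).map f = (List.range n).map (fun (k : Nat) => f (k : Int)) := by
  rw [PySem.List.pyRange_one]
  simp [List.map_map, Function.comp]

theorem portB_eq (delay : List (List Int)) (var_names : List String) :
    get_var_list_alt delay var_names
      = (pvBig delay var_names var_names.length, pvSids delay var_names.length) := by
  unfold get_var_list_alt
  simp only
  have hlengths : (PySem.List.pyRange 0 (var_names.length : Int) 1).map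
      (fun i => ((PySem.List.pyGetD delay i []).length : Int))
      = (List.range var_names.length).map (fun k => (pvLen delay k : Int)) := by
    rw [pyRange_nat_map]; rfl
  rw [hlengths]
  have hnames : var_names = (List.range var_names.length).map (fun k => pvName var_names k) := by
    apply List.ext_getElem
    · simp
    · intro i h1 h2
      simp only [List.getElem_map, List.getElem_range, pvName, PySem.List.pyGetD_natCast]
      rw [List.getD_eq_getElem?_getD, List.getElem?_eq_getElem h1]
      rfl
  have hflat : ((var_names.zip ((List.range var_names.length).map (fun k => (pvLen delay k : Int)))).flatMap
      (fun p => (PySem.List.pyRange 0 p.2 1).map (fun _ => p.1)))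
      = (List.range var_names.length).flatMap (fun i => (List.range (pvLen delay i)).map (fun _ => pvName var_names i)) := by
    nth_rewrite 1 [hnames]
    rw [List.zip_map', List.flatMap_map]
    refine congrArg (fun f => List.flatMap f (List.range var_names.length)) (funext fun i => ?_)
    show (PySem.List.pyRange 0 ((pvLen delay i : Nat) : Int) 1).map (fun _ => pvName var_names i) = _
    rw [pyRange_nat_map]
  rw [hflat]
  have hfresh : ∀ p ∈ PySem.List.enumerate
      ((List.range var_names.length).flatMap (fun i => (List.range (pvLen delay i)).map (fun _ => pvName var_names i))) 0,
      (PySem.Dict.empty : PySem.Dict Int String).contains ((fun (q : Int × String) => q.1) p) = false := by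
    intro p _; exact PySem.Dict.contains_empty _
  have hnodup : ((PySem.List.enumerate
      ((List.range var_names.length).flatMap (fun i => (List.range (pvLen delay i)).map (fun _ => pvName var_names i))) 0).map
      (fun (q : Int × String) => q.1)).Nodup := by
    rw [show (fun (q : Int × String) => q.1) = Prod.fst from rfl, enumerate_map_fst]
    refine List.Nodup.map ?_ (List.nodup_range)
    intro a b hab
    simpa using hab
  refine Prod.ext ?_ ?_
  · show (List.foldl (fun (d : PySem.Dict Int String) (p : Int × String) => d.insert p.1 p.2) PySem.Dict.empty _).items = _
    rw [PySem.Dict.items_foldl_insert_fresh _ (fun (q : Int × String) => q.1)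
      (fun (q : Int × String) => q.2) PySem.Dict.empty hfresh hnodup]
    rw [show (PySem.Dict.empty : PySem.Dict Int String).items = [] from rfl, List.nil_append]
    rw [show (fun (q : Int × String) => (q.1, q.2)) = id from funext fun q => rfl, List.map_id]
    exact enumerate_flat delay var_names var_names.length
  · show (PySem.List.pyRange 0 _ 1).map _ = _
    rw [List.length_map, List.length_range, pyRange_nat_map]
    apply List.map_congr_left
    intro k hk
    have hkN : k ≤ var_names.length := le_of_lt (List.mem_range.1 hk)
    rw [PySem.List.slice_to_natCast, ← List.map_take, List.take_range, Nat.min_eq_left hkN,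
      sum_take_len]

-- ===== VERDICT (by name: the statement is the Claim_ definition above) =====
theorem get_var_list_spec : Claim_equal_get_var_list := by
  intro delay var_names _ _
  unfold Spec_get_var_list
  rw [portA_eq, portB_eq]
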